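-- pv_equiv track=rewrite | github.com/TheCookieLab/XChange | scripts/run-manager-to-completion.py | find_method_declaration_line
-- ===== SOURCE A (Python) =====
-- def find_method_declaration_line(lines: list[str], violation_line: int, method_name: str) -> int | None:
--     """Find the 0-based index of the line that declares the method containing violation_line."""
--     if not method_name or violation_line <= 0:
--         return None
--     # violation_line is 1-based; scan backward from violation_line-1
--     for i in range(min(violation_line - 1, len(lines) - 1), -1, -1):
--         line = lines[i]
--         # Method declaration: contains method_name and (
--         if method_name in line and "(" in line and ("public" in line or "private" in line or "protected" in line or "  " in line):
--             return i
--     return None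
-- ===== SOURCE B (Python) =====
-- def find_method_declaration_line(lines: list[str], violation_line: int, method_name: str) -> int | None:
--     """Find the 0-based index of the line that declares the method containing violation_line."""
--     if not method_name or violation_line <= 0:
--         return None
--     bound = min(violation_line - 1, len(lines) - 1)
--     eligible = [i for i, line in enumerate(lines)
--                 if i <= bound
--                 and method_name in line and "(" in line
--                 and ("public" in line or "private" in line or "protected" in line or "  " in line)]
--     return eligible[-1] if eligible else None
-- ===== Notes on version B (the rewrite author's own statement) =====
-- stated objective: alternative
-- what changed: Replaced A's backward index loop with early return by building, via one filtering comprehension over enumerate(lines), the full list of eligible declaration indices and returning its last element (or None).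
import Mathlib
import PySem

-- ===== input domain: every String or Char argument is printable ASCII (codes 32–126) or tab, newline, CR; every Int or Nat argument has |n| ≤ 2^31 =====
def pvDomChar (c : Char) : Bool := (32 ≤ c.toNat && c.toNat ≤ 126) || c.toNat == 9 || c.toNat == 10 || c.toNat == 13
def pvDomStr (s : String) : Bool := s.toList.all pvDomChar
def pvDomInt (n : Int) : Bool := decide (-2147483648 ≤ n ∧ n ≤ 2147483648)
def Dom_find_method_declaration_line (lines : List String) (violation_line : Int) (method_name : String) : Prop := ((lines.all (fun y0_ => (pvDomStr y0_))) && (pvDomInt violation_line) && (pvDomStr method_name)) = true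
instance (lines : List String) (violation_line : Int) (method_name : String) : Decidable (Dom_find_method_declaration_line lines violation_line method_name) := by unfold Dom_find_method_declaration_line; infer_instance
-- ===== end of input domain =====

-- B replaces A's backward early-exit loop by one filtering comprehension over
-- enumerate(lines) collecting every eligible declaration index, then takes the
-- last one (alternative decomposition, same cost).

-- ===== PORT A =====
-- The declaration predicate shared by both Pythons, transliterated once.
def pvDecl (method_name line : String) : Bool :=
  PySem.Str.isIn method_name line && PySem.Str.isIn "(" line &&
  (PySem.Str.isIn "public" line || PySem.Str.isIn "private" line ||
   PySem.Str.isIn "protected" line || PySem.Str.isIn "  " line)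

-- A: backward for-loop over range(min(violation_line-1, len(lines)-1), -1, -1),
-- returning the first matching index (find? mirrors the early return).
-- Every i produced by the range is a valid index, so pyGetD's default is never used.
def find_method_declaration_line (lines : List String) (violation_line : Int) (method_name : String) : Option Int :=
  if method_name = "" ∨ violation_line ≤ 0 then none
  else
    (PySem.List.pyRange (min (violation_line - 1) (PySem.List.len lines - 1)) (-1) (-1)).find?
      (fun i => pvDecl method_name (PySem.List.pyGetD lines i ""))

-- ===== PORT B =====
-- B: one comprehension over enumerate(lines) keeping eligible declaration
-- indices, then `eligible[-1] if eligible else None` = getLast?.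
def find_method_declaration_line_alt (lines : List String) (violation_line : Int) (method_name : String) : Option Int :=
  if method_name = "" ∨ violation_line ≤ 0 then none
  else
    let bound := min (violation_line - 1) (PySem.List.len lines - 1)
    let eligible :=
      ((PySem.List.enumerate lines 0).filter
        (fun p => decide (p.1 ≤ bound) && pvDecl method_name p.2)).map (fun p => p.1)
    eligible.getLast?

-- ===== PRECONDITION & SPEC =====
def Spec_find_method_declaration_line (lines : List String) (violation_line : Int) (method_name : String) (out : Option Int) : Prop := out = find_method_declaration_line_alt lines violation_line method_name
instance (lines : List String) (violation_line : Int) (method_name : String) (out : Option Int) : Decidable (Spec_find_method_declaration_line lines violation_line method_name out) := by unfold Spec_find_method_declaration_line; infer_instance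

-- ===== CLAIM (what is proved, stated in full; the proofs are below) =====
def Claim_equal_find_method_declaration_line : Prop := ∀ (lines : List String) (violation_line : Int) (method_name : String), Dom_find_method_declaration_line lines violation_line method_name → Spec_find_method_declaration_line lines violation_line method_name (find_method_declaration_line lines violation_line method_name)

-- ===== LEMMAS AND PROOFS =====

-- head? of a filter is find?.
theorem head?_filter_eq_find? {α : Type} (p : α → Bool) (l : List α) :
    (l.filter p).head? = l.find? p := by
  induction l with
  | nil => rfl
  | cons x l ih => by_cases h : p x <;> simp [List.find?, h, ih]

-- find? only looks at values the predicate takes on members.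
theorem find?_congr_mem {α : Type} (p q : α → Bool) (l : List α)
    (h : ∀ x ∈ l, p x = q x) : l.find? p = l.find? q := by
  induction l with
  | nil => rfl
  | cons x l ih =>
    have hx := h x (by simp)
    simp only [List.find?, hx]
    cases q x with
    | true => rfl
    | false => exact ih (fun y hy => h y (by simp [hy]))

-- Core: B's last eligible index equals A's backward find?, for 0 ≤ k < len.
theorem core_lemma (l : List String) (q : String → Bool) (k : Nat) (hk : k < l.length) :
    (((PySem.List.enumerate l 0).filter
        (fun p => decide (p.1 ≤ (k : Int)) && q p.2)).map (fun p => p.1)).getLast?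
      = (PySem.List.pyRange (k : Int) (-1) (-1)).find? (fun i => q (PySem.List.pyGetD l i "")) := by
  rw [PySem.List.enumerate_eq_map_pyRange l ""]
  rw [List.filter_map, List.map_map]
  have hmapid : ((fun p : Int × String => p.1) ∘ fun j => (j, PySem.List.pyGetD l j "")) = id := rfl
  rw [hmapid, List.map_id]
  rw [List.getLast?_eq_head?_reverse, ← List.filter_reverse, head?_filter_eq_find?]
  have hlen : PySem.List.len l = (l.length : Int) := by simp [PySem.List.len]
  have hrev : (PySem.List.pyRange 0 (PySem.List.len l) 1).reverse
      = PySem.List.pyRange ((l.length : Int) - 1) (-1) (-1) := by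
    rw [PySem.List.pyRange_neg_one_eq_reverse, hlen]
    norm_num
  rw [hrev]
  -- split the countdown from len-1 at k
  have hsplit : PySem.List.pyRange ((l.length : Int) - 1) (-1) (-1)
      = PySem.List.pyRange ((l.length : Int) - 1) (k : Int) (-1)
        ++ PySem.List.pyRange (k : Int) (-1) (-1) := by
    rw [PySem.List.pyRange_neg_one_eq_reverse, PySem.List.pyRange_neg_one_eq_reverse,
        PySem.List.pyRange_neg_one_eq_reverse, ← List.reverse_append]
    congr 1
    have h01 : (-1 : Int) + 1 = 0 := by norm_num
    rw [h01]
    exact PySem.List.pyRange_one_append 0 ((k : Int) + 1) ((l.length : Int) - 1 + 1)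
        (by omega) (by omega)
  rw [hsplit, List.find?_append]
  -- first segment: every j there has k < j, so the `j ≤ k` conjunct is false
  have h1 : (PySem.List.pyRange ((l.length : Int) - 1) (k : Int) (-1)).find?
      ((fun p : Int × String => decide (p.1 ≤ (k : Int)) && q p.2) ∘
        fun j => (j, PySem.List.pyGetD l j "")) = none := by
    apply List.find?_eq_none.mpr
    intro j hj
    rw [PySem.List.mem_pyRange_neg_one] at hj
    simp only [Function.comp]
    have : ¬ (j ≤ (k : Int)) := by omega
    simp [this]
  rw [h1, Option.none_or]
  -- second segment: every j there has j ≤ k, the conjunct drops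
  apply find?_congr_mem
  intro j hj
  rw [PySem.List.mem_pyRange_neg_one] at hj
  simp only [Function.comp]
  have : j ≤ (k : Int) := hj.2
  simp [this]

-- ===== VERDICT (by name: the statement is the Claim_ definition above) =====
theorem find_method_declaration_line_spec : Claim_equal_find_method_declaration_line := by
  intro lines vl mn _
  unfold Spec_find_method_declaration_line find_method_declaration_line find_method_declaration_line_alt
  by_cases hg : mn = "" ∨ vl ≤ 0
  · simp [hg]
  · simp only [hg, if_false]
    rw [not_or] at hg
    obtain ⟨hmn, hvl⟩ := hg
    cases lines with
    | nil =>
      rw [PySem.List.pyRange_neg_one_eq_nil (by simp [PySem.List.len])]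
      simp [PySem.List.enumerate]
    | cons x xs =>
      have hm0 : 0 ≤ min (vl - 1) (PySem.List.len (x :: xs) - 1) := by
        simp [PySem.List.len]; omega
      obtain ⟨k, hk⟩ := Int.eq_ofNat_of_zero_le hm0
      have hklt : k < (x :: xs).length := by
        have h2 : min (vl - 1) (PySem.List.len (x :: xs) - 1) ≤ PySem.List.len (x :: xs) - 1 :=
          min_le_right _ _
        rw [hk] at h2
        simp [PySem.List.len] at h2
        simp only [List.length_cons]
        omega
      rw [hk]
      exact (core_lemma (x :: xs) (pvDecl mn) k hklt).symm
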